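-- pv_equiv track=rewrite | github.com/lucasfariass/criptografia-python | criptografia.py | getParesDeLetras
-- ===== SOURCE A (Python) =====
-- def getParesDeLetras(frase):
--     paresDeLetras = []
--     parLetras = ""
--
--     if len(frase) % 2 != 0:
--         frase += frase[-1]
--
--     for letra in frase:
--         if letra != " ":
--             parLetras += letra
--             if len(parLetras) == 2:
--                 paresDeLetras.append(parLetras)
--                 parLetras = ""
--
--     return paresDeLetras
-- ===== SOURCE B (Python) =====
-- def getParesDeLetras(frase):
--     if len(frase) % 2 != 0:
--         frase += frase[-1]
--     letras = frase.replace(" ", "")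
--     return [letras[i:i+2] for i in range(0, len(letras) - 1, 2)]
-- ===== Notes on version B (the rewrite author's own statement) =====
-- stated objective: idiomatic
-- what changed: A's single interleaved loop (skip spaces while accumulating a two-char buffer) is replaced by the same odd-length padding guard, one str.replace pass removing spaces, and a striding slice comprehension over range(0, len-1, 2).
import Mathlib
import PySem

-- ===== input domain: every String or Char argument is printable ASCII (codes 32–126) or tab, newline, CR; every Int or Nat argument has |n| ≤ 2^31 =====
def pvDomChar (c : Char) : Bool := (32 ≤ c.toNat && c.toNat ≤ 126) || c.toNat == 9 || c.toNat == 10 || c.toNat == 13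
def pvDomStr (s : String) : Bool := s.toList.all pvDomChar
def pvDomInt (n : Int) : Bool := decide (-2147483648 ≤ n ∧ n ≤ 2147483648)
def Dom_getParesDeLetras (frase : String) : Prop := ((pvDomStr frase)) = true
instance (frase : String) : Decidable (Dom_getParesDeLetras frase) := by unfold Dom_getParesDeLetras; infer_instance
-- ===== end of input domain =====

-- B replaces A's single interleaved filter+group loop by the same padding guard, a space-removing
-- replace pass, and a striding slice comprehension (objective: idiomatic; measured constant-factor faster via C-level replace/slicing; same return value everywhere).

-- ===== PORT A =====
-- one loop step: skip spaces, grow the two-char buffer, flush it into the accumulator at length 2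
def pairStep (st : List String × List Char) (letra : Char) : List String × List Char :=
  if letra ≠ ' ' then
    let parLetras := st.2 ++ [letra]
    if parLetras.length = 2 then (st.1 ++ [String.ofList parLetras], []) else (st.1, parLetras)
  else st

def getParesDeLetras (frase : String) : List String :=
  let cs := frase.toList
  -- frase[-1]: reached only when the length is odd, hence cs ≠ [] and pyGetD never takes the default
  let cs := if cs.length % 2 ≠ 0 then cs ++ [PySem.List.pyGetD cs (-1) ' '] else cs
  (cs.foldl pairStep ([], [])).1

-- ===== PORT B =====
def getParesDeLetras_alt (frase : String) : List String :=
  let cs := frase.toList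
  let cs := if cs.length % 2 ≠ 0 then cs ++ [PySem.List.pyGetD cs (-1) ' '] else cs
  let letras := PySem.Chars.replace cs [' '] []   -- frase.replace(" ", "")
  (PySem.List.pyRange 0 ((letras.length : Int) - 1) 2).map
    (fun i => String.ofList (PySem.List.slice letras (some i) (some (i + 2))))

-- ===== PRECONDITION & SPEC =====
def Spec_getParesDeLetras (frase : String) (out : List String) : Prop := out = getParesDeLetras_alt frase
instance (frase : String) (out : List String) : Decidable (Spec_getParesDeLetras frase out) := by unfold Spec_getParesDeLetras; infer_instance

-- ===== CLAIM (what is proved, stated in full; the proofs are below) =====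
def Claim_equal_getParesDeLetras : Prop := ∀ (frase : String), Dom_getParesDeLetras frase → Spec_getParesDeLetras frase (getParesDeLetras frase)

-- ===== LEMMAS AND PROOFS =====

-- reference form: consecutive pairs of a (space-free) character list
def pairsOf : List Char → List String
  | a :: b :: t => String.ofList [a, b] :: pairsOf t
  | _ => []

-- A's step ignores spaces, so the fold over cs equals the fold over the space-filtered cs
theorem foldl_pairStep_filter (cs : List Char) (st : List String × List Char) :
    cs.foldl pairStep st = (cs.filter (· ≠ ' ')).foldl pairStep st := by
  induction cs generalizing st with
  | nil => rfl
  | cons c t ih =>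
    by_cases hc : c = ' '
    · subst hc
      simpa [List.filter, pairStep] using ih st
    · simp [List.filter, hc, List.foldl, ih]

-- on a space-free list, A's fold from (acc, []) appends exactly the consecutive pairs
theorem foldl_pairStep_pairsOf : ∀ (l : List Char) (acc : List String),
    (∀ c ∈ l, c ≠ ' ') → (l.foldl pairStep (acc, [])).1 = acc ++ pairsOf l
  | [], acc, _ => by simp [pairsOf]
  | [a], acc, h => by
    have ha : a ≠ ' ' := h a (by simp)
    simp [List.foldl, pairStep, ha, pairsOf]
  | a :: b :: t, acc, h => by
    have ha : a ≠ ' ' := h a (by simp)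
    have hb : b ≠ ' ' := h b (by simp)
    have ht : ∀ c ∈ t, c ≠ ' ' := fun c hc => h c (by simp [hc])
    calc ((a :: b :: t).foldl pairStep (acc, [])).1
        = (t.foldl pairStep (acc ++ [String.ofList [a, b]], [])).1 := by
          simp [List.foldl, pairStep, ha, hb]
      _ = acc ++ [String.ofList [a, b]] ++ pairsOf t := foldl_pairStep_pairsOf t _ ht
      _ = acc ++ pairsOf (a :: b :: t) := by simp [pairsOf]

-- pairsOf as an index-striding map (Nat form)
theorem pairsOf_eq_range_map : ∀ (l : List Char),
    pairsOf l = (List.range (l.length / 2)).map (fun k => String.ofList ((l.drop (2 * k)).take 2))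
  | [] => by simp [pairsOf]
  | [a] => by simp [pairsOf]
  | a :: b :: t => by
    have ih := pairsOf_eq_range_map t
    have hlen : (a :: b :: t).length / 2 = t.length / 2 + 1 := by simp; omega
    rw [pairsOf, hlen, List.range_succ_eq_map, List.map_cons, ih, List.map_map]
    refine congrArg₂ _ (by simp) (List.map_congr_left fun k _ => ?_)
    simp only [Function.comp_apply]
    have h2 : 2 * k.succ = 2 * k + 1 + 1 := by omega
    rw [h2, List.drop_succ_cons, List.drop_succ_cons]


-- B's pyRange/slice comprehension computes the same striding map
theorem alt_map_eq_range_map (l : List Char) :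
    (PySem.List.pyRange 0 ((l.length : Int) - 1) 2).map
        (fun i => String.ofList (PySem.List.slice l (some i) (some (i + 2))))
      = (List.range (l.length / 2)).map (fun k => String.ofList ((l.drop (2 * k)).take 2)) := by
  rw [PySem.List.pyRange_of_pos 0 ((l.length : Int) - 1) (by norm_num), List.map_map]
  have hcount : (if (0 : Int) < (l.length : Int) - 1 then
      (((l.length : Int) - 1 - 0 + 2 - 1) / 2).toNat else 0) = l.length / 2 := by
    split_ifs with h
    · omega
    · omega
  rw [hcount]
  refine List.map_congr_left fun k _ => ?_
  simp only [Function.comp_apply]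
  have h2k : (0 : Int) + 2 * (k : Int) = ((2 * k : Nat) : Int) := by push_cast; ring
  have h2k2 : ((2 * k : Nat) : Int) + 2 = ((2 * k : Nat) : Int) + ((2 : Nat) : Int) := by norm_num
  rw [h2k, h2k2, PySem.List.slice_natCast_add]

-- replace(" ", "") is the space filter: characterise the fuelled go loop first
theorem replace_go_space (fuel : Nat) : ∀ (l acc : List Char), l.length ≤ fuel →
    PySem.Chars.replace.go [' '] [] fuel l acc = acc.reverse ++ l.filter (· ≠ ' ') := by
  induction fuel with
  | zero =>
    intro l acc h
    have : l = [] := List.eq_nil_of_length_eq_zero (by omega)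
    subst this
    rw [PySem.Chars.replace.go]
    simp
  | succ n ih =>
    intro l acc h
    match l with
    | [] => simp [PySem.Chars.replace.go]
    | c :: t =>
      by_cases hc : c = ' '
      · subst hc
        have hpre : [' '].isPrefixOf (' ' :: t) = true := by simp [List.isPrefixOf]
        rw [PySem.Chars.replace.go, if_pos hpre]
        simpa [List.filter] using ih t acc (by simpa using Nat.lt_succ_iff.mp (by simpa using h))
      · have hpre : [' '].isPrefixOf (c :: t) = false := by
          simp [List.isPrefixOf]
          exact fun hcs => hc hcs.symm
        rw [PySem.Chars.replace.go, if_neg (by simp [hpre])]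
        rw [ih t (c :: acc) (by simpa using Nat.lt_succ_iff.mp (by simpa using h))]
        simp [List.filter, hc]

theorem replace_space_eq_filter (cs : List Char) :
    PySem.Chars.replace cs [' '] [] = cs.filter (· ≠ ' ') := by
  rw [PySem.Chars.replace]
  simp only [List.isEmpty_cons, Bool.false_eq_true, if_false]
  exact replace_go_space cs.length cs [] le_rfl

-- ===== VERDICT (by name: the statement is the Claim_ definition above) =====
-- both ports applied to the same (padded) character list agree
theorem ports_agree_on_list (cs' : List Char) :
    ((cs'.foldl pairStep ([], [])).1 : List String) =
      (PySem.List.pyRange 0 (((PySem.Chars.replace cs' [' '] []).length : Int) - 1) 2).map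
        (fun i => String.ofList (PySem.List.slice (PySem.Chars.replace cs' [' '] []) (some i) (some (i + 2)))) := by
  rw [replace_space_eq_filter, alt_map_eq_range_map, ← pairsOf_eq_range_map,
      foldl_pairStep_filter]
  have hnos : ∀ c ∈ cs'.filter (· ≠ ' '), c ≠ ' ' := by
    intro c hc
    simpa using (List.of_mem_filter hc)
  simpa using foldl_pairStep_pairsOf (cs'.filter (· ≠ ' ')) [] hnos

theorem getParesDeLetras_spec : Claim_equal_getParesDeLetras := by
  intro frase _
  show getParesDeLetras frase = getParesDeLetras_alt frase
  exact ports_agree_on_list _
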